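-- pv_equiv track=rewrite | github.com/ramosv/Python-MiniProjects | factorials_dict.py | factorinals
-- ===== SOURCE A (Python) =====
-- def factorinals(x):
--     dicto = {}
--     result = 1
--     count = 1
--
--     while count <= x:
--         result *= count
--         dicto[count] = result
--         count +=1
--
--     return dicto
-- ===== SOURCE B (Python) =====
-- import math
--
--
-- def factorinals(x):
--     return {n: math.factorial(n) for n in range(1, int(x) + 1)}
-- ===== Notes on version B (the rewrite author's own statement) =====
-- stated objective: idiomatic
-- what changed: Replaces the while-loop carrying a running product and a mutated dict with a single dict comprehension over range(1, x+1) computing each factorial independently via math.factorial.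
import Mathlib
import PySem

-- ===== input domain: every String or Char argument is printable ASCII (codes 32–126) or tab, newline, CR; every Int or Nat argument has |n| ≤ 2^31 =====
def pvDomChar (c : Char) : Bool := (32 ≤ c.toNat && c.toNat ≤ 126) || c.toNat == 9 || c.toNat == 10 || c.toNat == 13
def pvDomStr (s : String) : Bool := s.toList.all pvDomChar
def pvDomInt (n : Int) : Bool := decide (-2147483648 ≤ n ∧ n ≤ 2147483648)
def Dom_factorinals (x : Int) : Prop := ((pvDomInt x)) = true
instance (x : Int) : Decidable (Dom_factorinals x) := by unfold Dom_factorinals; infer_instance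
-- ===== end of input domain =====

-- B replaces A's running-product while-loop with a dict comprehension computing each
-- factorial independently (idiomatic, not faster).

-- ===== PORT A =====
-- while count <= x: result *= count; dicto[count] = result; count += 1
def factLoopA (x count result : Int) (d : PySem.Dict Int Int) : PySem.Dict Int Int :=
  if count ≤ x then
    factLoopA x (count + 1) (result * count) (d.insert count (result * count))
  else d
termination_by (x + 1 - count).toNat
decreasing_by omega

def factorinals (x : Int) : List (Int × Int) :=
  (factLoopA x 1 1 PySem.Dict.empty).items

-- ===== PORT B =====
-- math.factorial(n) (n coerced as Python does for nonnegative ints; keys here are ≥ 1)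
def pyFact (n : Int) : Int := (Nat.factorial n.toNat : Int)

-- {n: math.factorial(n) for n in range(1, int(x) + 1)}: the comprehension builds a dict
-- by inserting each key in order, i.e. a fold of insert over the range.
def factorinals_alt (x : Int) : List (Int × Int) :=
  ((PySem.List.pyRange 1 (x + 1) 1).foldl
    (fun d n => d.insert n (pyFact n)) PySem.Dict.empty).items

-- ===== PRECONDITION & SPEC =====
def Spec_factorinals (x : Int) (out : List (Int × Int)) : Prop := out = factorinals_alt x
instance (x : Int) (out : List (Int × Int)) : Decidable (Spec_factorinals x out) := by
  unfold Spec_factorinals; infer_instance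

-- ===== CLAIM (what is proved, stated in full; the proofs are below) =====
def Claim_equal_factorinals : Prop := ∀ (x : Int), Dom_factorinals x → Spec_factorinals x (factorinals x)

-- ===== LEMMAS AND PROOFS =====

theorem pyFact_step (c : Int) (h : 1 ≤ c) : pyFact (c - 1) * c = pyFact c := by
  unfold pyFact
  have hc : c.toNat = (c - 1).toNat + 1 := by omega
  rw [hc, Nat.factorial_succ]
  push_cast
  have h2 : ((c - 1).toNat : Int) = c - 1 := by omega
  rw [h2]
  ring

theorem factLoopA_items (k : Nat) : ∀ (x count : Int) (d : PySem.Dict Int Int),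
    (x + 1 - count).toNat = k → 1 ≤ count → (∀ p ∈ d.items, p.1 < count) →
    (factLoopA x count (pyFact (count - 1)) d).items
      = d.items ++ (PySem.List.pyRange count (x + 1) 1).map (fun n => (n, pyFact n)) := by
  induction k with
  | zero =>
    intro x count d hk h1 hlt
    have hx : ¬ count ≤ x := by omega
    rw [factLoopA, if_neg hx, PySem.List.pyRange_one_eq_nil (by omega)]
    simp
  | succ k ih =>
    intro x count d hk h1 hlt
    have hx : count ≤ x := by omega
    rw [factLoopA, if_pos hx, pyFact_step count h1]
    have hnc : d.contains count = false := by
      rw [PySem.Dict.contains_eq_decide_mem_keys]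
      simp only [decide_eq_false_iff_not, PySem.Dict.keys, List.mem_map]
      rintro ⟨p, hp, rfl⟩
      exact absurd (hlt p hp) (by omega)
    have hih := ih x (count + 1) (d.insert count (pyFact count)) (by omega) (by omega)
      (by
        intro p hp
        rcases (PySem.Dict.mem_items_insert _ _ _ p).1 hp with h | ⟨h, _⟩
        · simp [h]
        · have := hlt p h; omega)
    norm_num at hih
    rw [hih, PySem.Dict.items_insert_of_not_contains _ _ hnc,
        PySem.List.pyRange_one_cons (by omega : count < x + 1)]
    simp

theorem alt_items (x : Int) :
    factorinals_alt x = (PySem.List.pyRange 1 (x + 1) 1).map (fun n => (n, pyFact n)) := by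
  unfold factorinals_alt
  have h := PySem.Dict.items_foldl_insert_fresh (l := PySem.List.pyRange 1 (x + 1) 1)
    (k := fun n => n) (v := pyFact) (d := PySem.Dict.empty)
    (by intro a _; exact PySem.Dict.contains_empty a)
    (by simpa using PySem.List.nodup_pyRange_one 1 (x + 1))
  simpa using h

-- ===== VERDICT (by name: the statement is the Claim_ definition above) =====
theorem factorinals_spec : Claim_equal_factorinals := by
  intro x _
  unfold Spec_factorinals factorinals
  rw [alt_items]
  have h := factLoopA_items x.toNat x 1 PySem.Dict.empty (by omega) (by omega) (by simp [PySem.Dict.empty])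
  have h1 : pyFact (1 - 1) = 1 := by decide
  rw [h1] at h
  rw [h]
  simp [PySem.Dict.empty]
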